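-- pv_equiv track=rewrite | github.com/thorn-ale/AoC2022 | AoC2022/day8.py | d_score
-- ===== SOURCE A (Python) =====
-- def d_score(curr_tree, other_trees):
--     score = 0
--     for ot in other_trees:
--         if ot < curr_tree:
--             score += 1
--         else:
--             score += 1
--             break
--     return score
-- ===== SOURCE B (Python) =====
-- def d_score(curr_tree, other_trees):
--     score = 0
--     for ot in reversed(other_trees):
--         score = score + 1 if ot < curr_tree else 1
--     return score
-- ===== Notes on version B (the rewrite author's own statement) =====
-- stated objective: alternative
-- what changed: Replaces the forward accumulate-and-break loop with a full right-to-left fold that resets the running score to 1 at each blocker, using the invariant that the folded score over a suffix equals the viewing distance from that suffix's start.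
import Mathlib
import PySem

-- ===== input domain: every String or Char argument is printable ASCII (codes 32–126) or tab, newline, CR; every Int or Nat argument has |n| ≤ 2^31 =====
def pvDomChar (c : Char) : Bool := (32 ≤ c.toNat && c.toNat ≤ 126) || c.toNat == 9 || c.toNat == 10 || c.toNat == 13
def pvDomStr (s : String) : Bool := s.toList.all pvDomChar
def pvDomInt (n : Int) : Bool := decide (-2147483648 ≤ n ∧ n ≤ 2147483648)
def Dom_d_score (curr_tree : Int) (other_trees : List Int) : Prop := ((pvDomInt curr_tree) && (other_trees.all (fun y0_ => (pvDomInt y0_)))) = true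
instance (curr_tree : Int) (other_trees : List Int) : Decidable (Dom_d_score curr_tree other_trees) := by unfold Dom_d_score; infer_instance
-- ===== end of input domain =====

-- B replaces A's forward accumulate-and-break loop with a full right-to-left fold that resets the score to 1 at each blocker (alternative algorithm, same result).
-- ===== PORT A =====
-- literal port of A's for-loop with break: recursion over the list carrying the score accumulator
def dScoreLoop (curr_tree : Int) (score : Int) : List Int → Int
  | [] => score
  | ot :: rest =>
    if ot < curr_tree then dScoreLoop curr_tree (score + 1) rest
    else score + 1

def d_score (curr_tree : Int) (other_trees : List Int) : Int :=
  dScoreLoop curr_tree 0 other_trees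

-- ===== PORT B =====
-- literal port of Source B: fold over reversed(other_trees) with state update 'score+1 if ot < curr_tree else 1'
def d_score_alt (curr_tree : Int) (other_trees : List Int) : Int :=
  other_trees.reverse.foldl (fun score ot => if ot < curr_tree then score + 1 else 1) 0

-- ===== PRECONDITION & SPEC =====
def Spec_d_score (curr_tree : Int) (other_trees : List Int) (out : Int) : Prop := out = d_score_alt curr_tree other_trees
instance (curr_tree : Int) (other_trees : List Int) (out : Int) : Decidable (Spec_d_score curr_tree other_trees out) := by unfold Spec_d_score; infer_instance

-- ===== CLAIM (what is proved, stated in full; the proofs are below) =====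
def Claim_equal_d_score : Prop := ∀ (curr_tree : Int) (other_trees : List Int), Dom_d_score curr_tree other_trees → Spec_d_score curr_tree other_trees (d_score curr_tree other_trees)

-- ===== LEMMAS AND PROOFS =====
-- unfolding B on a cons: the backward fold over ot :: rest ends by processing ot
theorem d_score_alt_cons (c ot : Int) (rest : List Int) :
    d_score_alt c (ot :: rest) = if ot < c then d_score_alt c rest + 1 else 1 := by
  simp [d_score_alt, List.foldl_append]

theorem dScoreLoop_eq (curr_tree : Int) (l : List Int) (s : Int) :
    dScoreLoop curr_tree s l = s + d_score_alt curr_tree l := by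
  induction l generalizing s with
  | nil => simp [dScoreLoop, d_score_alt]
  | cons ot rest ih =>
    rw [d_score_alt_cons]
    by_cases h : ot < curr_tree
    · simp [dScoreLoop, h, ih]; ring
    · simp [dScoreLoop, h]

-- ===== VERDICT (by name: the statement is the Claim_ definition above) =====
theorem d_score_spec : Claim_equal_d_score := by
  intro c l _
  unfold Spec_d_score d_score
  rw [dScoreLoop_eq]
  omega
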